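-- pv_equiv track=rewrite | github.com/adityashuklaa/BACKLINK | core/safety.py | rotate_destination
-- ===== SOURCE A (Python) =====
-- DESTINATION_URLS = [
--     "https://dialphone.com",
--     "https://dialphone.com/pricing-overview/",
--     "https://dialphonelimited.codeberg.page/calculator/",
--     "https://dialphonelimited.codeberg.page/calculator/#methodology",
-- ]
--
-- def rotate_destination(idx: int) -> str:
--     """Pick a destination URL based on index — rotates through 4 URLs.
--
--     Distribution we want over a batch of N publishes:
--     - 50% to dialphone.com homepage
--     - 20% to /pricing-overview/
--     - 20% to /calculator/
--     - 10% to /calculator/#methodology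
--     """
--     weights = [50, 20, 20, 10]
--     seed = idx % sum(weights)
--     cum = 0
--     for i, w in enumerate(weights):
--         cum += w
--         if seed < cum:
--             return DESTINATION_URLS[i]
--     return DESTINATION_URLS[0]
-- ===== SOURCE B (Python) =====
-- DESTINATION_URLS = [
--     "https://dialphone.com",
--     "https://dialphone.com/pricing-overview/",
--     "https://dialphonelimited.codeberg.page/calculator/",
--     "https://dialphonelimited.codeberg.page/calculator/#methodology",
-- ]
--
-- def rotate_destination(idx: int) -> str:
--     """Pick a destination URL by comparing the seed against the fixed
--     cumulative weight thresholds arithmetically (no scan, no counter)."""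
--     seed = idx % 100
--     return DESTINATION_URLS[(seed >= 50) + (seed >= 70) + (seed >= 90)]
-- ===== Notes on version B (the rewrite author's own statement) =====
-- stated objective: simpler
-- what changed: Replaced the accumulating linear scan over the weight list with a closed-form bucket index computed from the fixed cumulative weight thresholds (a sum of three comparisons), indexing the URL table directly.
import Mathlib
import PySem

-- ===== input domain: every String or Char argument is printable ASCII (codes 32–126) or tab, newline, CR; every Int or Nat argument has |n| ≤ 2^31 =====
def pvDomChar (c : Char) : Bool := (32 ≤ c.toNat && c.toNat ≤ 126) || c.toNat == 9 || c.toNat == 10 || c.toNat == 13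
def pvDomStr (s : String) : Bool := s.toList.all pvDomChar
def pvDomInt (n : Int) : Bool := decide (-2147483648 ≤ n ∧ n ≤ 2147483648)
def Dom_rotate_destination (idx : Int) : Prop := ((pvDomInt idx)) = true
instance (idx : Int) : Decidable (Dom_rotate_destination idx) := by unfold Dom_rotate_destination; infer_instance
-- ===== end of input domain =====

-- B replaces A's accumulating scan over the weight list by a closed-form bucket index
-- from the fixed cumulative weight thresholds (objective: simpler).

-- module constant DESTINATION_URLS (shared by both ports, as in the Python module)
def pvUrls : List String :=
  [ "https://dialphone.com"
  , "https://dialphone.com/pricing-overview/"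
  , "https://dialphonelimited.codeberg.page/calculator/"
  , "https://dialphonelimited.codeberg.page/calculator/#methodology" ]

-- ===== PORT A =====
-- the 'for i, w in enumerate(weights)' loop with the running cum and the early return
def pvRotLoop (seed : Int) : List (Int × Int) → Int → Option String
  | [], _ => none
  | (i, w) :: rest, cum =>
    let cum := cum + w
    if seed < cum then (PySem.List.pyGet? pvUrls i).getD ""   -- index i is always in range in A
    else pvRotLoop seed rest cum

def rotate_destination (idx : Int) : String :=
  let weights : List Int := [50, 20, 20, 10]
  let seed := PySem.Int.mod idx weights.sum
  match pvRotLoop seed (PySem.List.enumerate weights) 0 with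
  | some s => s
  | none => (PySem.List.pyGet? pvUrls 0).getD ""

-- ===== PORT B =====
def rotate_destination_alt (idx : Int) : String :=
  let seed := PySem.Int.mod idx 100
  let i : Int := (if seed ≥ 50 then 1 else 0) + (if seed ≥ 70 then 1 else 0)
               + (if seed ≥ 90 then 1 else 0)
  (PySem.List.pyGet? pvUrls i).getD ""   -- index is always 0..3 in B

-- ===== PRECONDITION & SPEC =====
def Spec_rotate_destination (idx : Int) (out : String) : Prop := out = rotate_destination_alt idx
instance (idx : Int) (out : String) : Decidable (Spec_rotate_destination idx out) := by unfold Spec_rotate_destination; infer_instance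

-- ===== CLAIM (what is proved, stated in full; the proofs are below) =====
def Claim_equal_rotate_destination : Prop := ∀ (idx : Int), Dom_rotate_destination idx → Spec_rotate_destination idx (rotate_destination idx)

-- ===== LEMMAS AND PROOFS =====

-- ===== VERDICT (by name: the statement is the Claim_ definition above) =====
theorem rotate_destination_spec : Claim_equal_rotate_destination := by
  intro idx _
  show rotate_destination idx = rotate_destination_alt idx
  have hsum : ([50, 20, 20, 10] : List Int).sum = 100 := by decide
  unfold rotate_destination rotate_destination_alt
  simp only [hsum]
  set s := PySem.Int.mod idx 100 with hs
  have h0 : 0 ≤ s := PySem.Int.mod_nonneg idx (by norm_num)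
  have h1 : s < 100 := PySem.Int.mod_lt idx (by norm_num)
  simp only [PySem.List.enumerate, pvRotLoop]
  split_ifs with c1 c2 c3 c4 <;>
    simp_all [pvUrls, PySem.List.pyGet?, PySem.List.pyIdx?] <;> omega
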